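-- pv_equiv track=rewrite | github.com/Rangdy-Kor/Nature-Shell | code/shell/parser.py | split_commands
-- ===== SOURCE A (Python) =====
-- def split_commands(block_tokens):
--     # 블록 안의 토큰들을 개별 명령어로 나누기
--     commands = []
--     current_command = []
--
--     for token in block_tokens:
--         token_type, value = token
--
--         if token_type == 'NOUN' and current_command:
--             commands.append(current_command)
--             current_command = [token]
--         else:
--             current_command.append(token)
--
--     if current_command:
--         commands.append(current_command)
--
--     return commands
-- ===== SOURCE B (Python) =====
-- def split_commands(block_tokens):
--     # Two-phase: find NOUN boundary indices, then slice the list at them.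
--     if not block_tokens:
--         return []
--     cuts = [i for i, (token_type, _value) in enumerate(block_tokens)
--             if token_type == 'NOUN' and i > 0]
--     commands = []
--     prev = 0
--     for cut in cuts + [len(block_tokens)]:
--         commands.append(block_tokens[prev:cut])
--         prev = cut
--     return commands
-- ===== Notes on version B (the rewrite author's own statement) =====
-- stated objective: alternative
-- what changed: Replaced A's single accumulator loop with a two-phase 'collect boundary indices, then slice' decomposition (enumerate+filter for cut points, then slicing between consecutive cuts).
import Mathlib
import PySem

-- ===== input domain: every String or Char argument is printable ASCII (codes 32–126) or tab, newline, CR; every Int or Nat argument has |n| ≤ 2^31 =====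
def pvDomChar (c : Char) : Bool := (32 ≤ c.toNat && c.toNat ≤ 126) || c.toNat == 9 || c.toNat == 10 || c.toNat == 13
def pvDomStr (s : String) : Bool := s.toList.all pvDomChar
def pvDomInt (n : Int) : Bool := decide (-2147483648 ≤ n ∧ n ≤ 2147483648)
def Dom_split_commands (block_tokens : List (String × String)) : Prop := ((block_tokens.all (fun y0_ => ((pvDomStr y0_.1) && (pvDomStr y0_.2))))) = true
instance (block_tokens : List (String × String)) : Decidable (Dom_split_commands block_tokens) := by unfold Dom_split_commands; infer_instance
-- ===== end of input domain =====

-- B replaces A's single accumulator loop by a two-phase 'find boundary indices, then slice' decomposition (alternative structure, same cost).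

-- ===== PORT A =====
def split_commands (block_tokens : List (String × String)) : List (List (String × String)) :=
  let st := block_tokens.foldl
    (fun (st : List (List (String × String)) × List (String × String)) token =>
      if token.1 == "NOUN" && !st.2.isEmpty then (st.1 ++ [st.2], [token])
      else (st.1, st.2 ++ [token]))
    ([], [])
  if !st.2.isEmpty then st.1 ++ [st.2] else st.1

-- ===== PORT B =====
def split_commands_alt (block_tokens : List (String × String)) : List (List (String × String)) :=
  if block_tokens.isEmpty then [] else
    let cuts : List Int := (PySem.List.enumerate block_tokens 0).filterMap
      (fun p => if p.2.1 == "NOUN" && decide (0 < p.1) then some p.1 else none)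
    ((cuts ++ [(block_tokens.length : Int)]).foldl
      (fun (st : List (List (String × String)) × Int) cut =>
        (st.1 ++ [PySem.List.slice block_tokens (some st.2) (some cut)], cut))
      ([], 0)).1

-- ===== PRECONDITION & SPEC =====
def Spec_split_commands (block_tokens : List (String × String)) (out : List (List (String × String))) : Prop := out = split_commands_alt block_tokens
instance (block_tokens : List (String × String)) (out : List (List (String × String))) : Decidable (Spec_split_commands block_tokens out) := by unfold Spec_split_commands; infer_instance

-- ===== CLAIM (what is proved, stated in full; the proofs are below) =====
def Claim_equal_split_commands : Prop := ∀ (block_tokens : List (String × String)), Dom_split_commands block_tokens → Spec_split_commands block_tokens (split_commands block_tokens)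

-- ===== LEMMAS AND PROOFS =====

-- A's loop as structural recursion: split the tail at every NOUN, current group is `cur`.
def pvGo (cur : List (String × String)) : List (String × String) → List (List (String × String))
  | [] => [cur]
  | y :: ys => if y.1 == "NOUN" then cur :: pvGo [y] ys else pvGo (cur ++ [y]) ys

-- groups of xs when a NOUN at ANY index (including 0) cuts; [[]] on []
def pvBcore : List (String × String) → List (List (String × String))
  | [] => [[]]
  | y :: ys =>
    if y.1 == "NOUN" then [] :: List.modifyHead (y :: ·) (pvBcore ys)
    else List.modifyHead (y :: ·) (pvBcore ys)

-- NOUN indices (from 0) of xs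
def pvNcuts : List (String × String) → List Nat
  | [] => []
  | y :: ys => (if y.1 == "NOUN" then [0] else []) ++ (pvNcuts ys).map (· + 1)

-- the slice phase of B as structural recursion over the cut list
def pvSf (bt : List (String × String)) : Int → List Int → List (List (String × String))
  | _, [] => []
  | p, c :: cs => PySem.List.slice bt (some p) (some c) :: pvSf bt c cs

theorem pvBcore_ne_nil (xs : List (String × String)) : pvBcore xs ≠ [] := by
  induction xs with
  | nil => simp [pvBcore]
  | cons y ys ih =>
    cases hb : pvBcore ys with
    | nil => exact absurd hb ih
    | cons h t => by_cases hy : y.1 == "NOUN" <;> simp [pvBcore, hy, hb]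

-- A's fold equals pvGo
theorem pvA_fold (l : List (String × String)) :
    ∀ (cs : List (List (String × String))) (cur : List (String × String)), cur ≠ [] →
    (let st := l.foldl
      (fun (st : List (List (String × String)) × List (String × String)) token =>
        if token.1 == "NOUN" && !st.2.isEmpty then (st.1 ++ [st.2], [token])
        else (st.1, st.2 ++ [token])) (cs, cur)
     if !st.2.isEmpty then st.1 ++ [st.2] else st.1) = cs ++ pvGo cur l := by
  induction l with
  | nil => intro cs cur h; simp [pvGo, h]
  | cons y ys ih =>
    intro cs cur h
    have hcur : cur.isEmpty = false := by simp [h]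
    simp only [List.foldl_cons]
    by_cases hy : y.1 == "NOUN"
    · rw [show (if (y.1 == "NOUN" && !cur.isEmpty) = true then (cs ++ [cur], [y])
            else (cs, cur ++ [y])) = (cs ++ [cur], [y]) by simp [hy, hcur]]
      rw [ih (cs ++ [cur]) [y] (by simp)]
      simp [pvGo, hy]
    · rw [show (if (y.1 == "NOUN" && !cur.isEmpty) = true then (cs ++ [cur], [y])
            else (cs, cur ++ [y])) = (cs, cur ++ [y]) by simp [hy]]
      rw [ih cs (cur ++ [y]) (by simp)]
      simp [pvGo, hy]

-- pvGo cur xs prepends cur to the first group of pvBcore xs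
theorem pvGo_eq_bcore (xs : List (String × String)) :
    ∀ cur : List (String × String),
    pvGo cur xs = List.modifyHead (cur ++ ·) (pvBcore xs) := by
  induction xs with
  | nil => intro cur; simp [pvGo, pvBcore]
  | cons y ys ih =>
    intro cur
    by_cases hy : y.1 == "NOUN"
    · simp only [pvGo, pvBcore, hy, if_true]
      rw [ih [y]]
      obtain ⟨h, t, hht⟩ : ∃ h t, pvBcore ys = h :: t := by
        cases hb : pvBcore ys with
        | nil => exact absurd hb (pvBcore_ne_nil ys)
        | cons h t => exact ⟨h, t, rfl⟩
      simp [hht]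
    · simp only [pvGo, pvBcore, hy]
      rw [ih (cur ++ [y])]
      obtain ⟨h, t, hht⟩ : ∃ h t, pvBcore ys = h :: t := by
        cases hb : pvBcore ys with
        | nil => exact absurd hb (pvBcore_ne_nil ys)
        | cons h t => exact ⟨h, t, rfl⟩
      simp [hht]

-- B's fold equals pvSf
theorem pvB_fold (bt : List (String × String)) (cs : List Int) :
    ∀ (acc : List (List (String × String))) (p : Int),
    (cs.foldl
      (fun (st : List (List (String × String)) × Int) cut =>
        (st.1 ++ [PySem.List.slice bt (some st.2) (some cut)], cut)) (acc, p)).1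
    = acc ++ pvSf bt p cs := by
  induction cs with
  | nil => intro acc p; simp [pvSf]
  | cons c cs ih =>
    intro acc p
    simp only [List.foldl_cons, pvSf]
    rw [ih]
    simp

-- the cut list of B equals pvNcuts shifted into enumerate's start offset (start ≥ 1)
theorem pvCuts_shift (xs : List (String × String)) :
    ∀ (s : Int), 1 ≤ s →
    (PySem.List.enumerate xs s).filterMap
      (fun p => if p.2.1 == "NOUN" && decide (0 < p.1) then some p.1 else none)
    = (pvNcuts xs).map (fun k : Nat => s + (k : Int)) := by
  induction xs with
  | nil => intro s _; simp [PySem.List.enumerate_nil, pvNcuts]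
  | cons y ys ih =>
    intro s hs
    rw [PySem.List.enumerate_cons, List.filterMap_cons, ih (s + 1) (by omega)]
    have hmm : (pvNcuts ys).map (fun k : Nat => (s + 1) + (k : Int))
        = ((pvNcuts ys).map (· + 1)).map (fun k : Nat => s + (k : Int)) := by
      rw [List.map_map]
      apply List.map_congr_left
      intro k _
      simp only [Function.comp_apply]
      push_cast
      ring
    have hpos : decide ((0:Int) < s) = true := by simp only [decide_eq_true_eq]; omega
    by_cases hy : y.1 == "NOUN"
    · simp only [show (if ((s, y).2.1 == "NOUN" && decide (0 < (s, y).1)) = true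
            then some (s, y).1 else none) = some s by simp [hy, hpos],
          show pvNcuts (y :: ys) = 0 :: (pvNcuts ys).map (· + 1) by simp [pvNcuts, hy],
          List.map_cons, hmm]
      norm_num
    · simp only [show (if ((s, y).2.1 == "NOUN" && decide (0 < (s, y).1)) = true
            then some (s, y).1 else none) = none by simp [hy],
          show pvNcuts (y :: ys) = (pvNcuts ys).map (· + 1) by simp [pvNcuts, hy],
          hmm]

-- slicing shift: dropping the head and shifting both bounds by one
theorem pvSf_shift (x : (String × String)) (xs : List (String × String)) :
    ∀ (ds : List Nat) (p : Nat),
    pvSf (x :: xs) ((p : Int) + 1) (ds.map (fun k : Nat => ((k : Int) + 1))) =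
    pvSf xs (p : Int) (ds.map (fun k : Nat => (k : Int))) := by
  intro ds
  induction ds with
  | nil => intro p; simp [pvSf]
  | cons d ds ih =>
    intro p
    simp only [List.map_cons, pvSf]
    congr 1
    · rw [show ((p : Int) + 1) = ((p + 1 : Nat) : Int) by push_cast; ring,
          show ((d : Int) + 1) = ((d + 1 : Nat) : Int) by push_cast; ring,
          PySem.List.slice_natCast, PySem.List.slice_natCast]
      rw [List.drop_succ_cons]
      congr 1
      omega
    · exact ih d

-- pvSf on x::xs from 0 with all cuts shifted by one equals consing x onto the head
theorem pvSf_head (x : (String × String)) (xs : List (String × String)) (cs : List Nat) :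
    pvSf (x :: xs) 0 ((cs ++ [xs.length]).map (fun k : Nat => ((k : Int) + 1))) =
    List.modifyHead (x :: ·) (pvSf xs 0 ((cs ++ [xs.length]).map (fun k : Nat => (k : Int)))) := by
  cases cs with
  | nil =>
    simp only [List.nil_append, List.map_cons, List.map_nil, pvSf, List.modifyHead_cons]
    rw [show ((0:Int)) = ((0 : Nat) : Int) by norm_num,
        show (((xs.length : Nat) : Int) + 1) = ((xs.length + 1 : Nat) : Int) by push_cast; ring,
        PySem.List.slice_natCast, PySem.List.slice_natCast]
    simp [List.take_succ_cons]
  | cons c cs =>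
    simp only [List.cons_append, List.map_cons, pvSf, List.modifyHead_cons]
    congr 1
    · rw [show ((0:Int)) = ((0 : Nat) : Int) by norm_num,
          show (((c : Nat) : Int) + 1) = ((c + 1 : Nat) : Int) by push_cast; ring,
          PySem.List.slice_natCast, PySem.List.slice_natCast]
      simp [List.take_succ_cons]
    · exact pvSf_shift x xs (cs ++ [xs.length]) c

-- pvSf from 0 over pvNcuts (with the length sentinel) is pvBcore
theorem pvSf_eq_bcore (xs : List (String × String)) :
    pvSf xs 0 ((pvNcuts xs ++ [xs.length]).map (fun k : Nat => (k : Int))) = pvBcore xs := by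
  induction xs with
  | nil =>
    simp only [pvNcuts, pvBcore, List.nil_append, List.map_cons, List.map_nil, pvSf,
      List.length_nil]
    rw [show ((0:Int)) = ((0 : Nat) : Int) by norm_num, PySem.List.slice_natCast]
    simp
  | cons y ys ih =>
    have hmap : ((pvNcuts ys).map (· + 1) ++ [ys.length + 1]).map (fun k : Nat => (k : Int))
        = (pvNcuts ys ++ [ys.length]).map (fun k : Nat => ((k : Int) + 1)) := by
      simp only [List.map_append, List.map_map, List.map_cons, List.map_nil]
      congr 1
    by_cases hy : y.1 == "NOUN"
    · simp only [pvNcuts, pvBcore, if_pos hy, List.cons_append,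
        List.map_cons, List.length_cons, pvSf]
      rw [show PySem.List.slice (y :: ys) (some 0) (some ((0 : Nat) : Int)) = [] by
            rw [PySem.List.slice_zero_start, PySem.List.slice_to_natCast]
            simp]
      simp only [Nat.cast_zero, List.nil_append]
      rw [hmap, pvSf_head y ys (pvNcuts ys), ih]
    · simp only [pvNcuts, pvBcore, if_neg hy, List.nil_append, List.length_cons]
      rw [hmap, pvSf_head y ys (pvNcuts ys), ih]

-- ===== VERDICT (by name: the statement is the Claim_ definition above) =====
theorem split_commands_spec : Claim_equal_split_commands := by
  intro bt _
  unfold Spec_split_commands split_commands split_commands_alt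
  cases bt with
  | nil => simp
  | cons x xs =>
    simp only [List.foldl_cons, List.isEmpty_cons, List.isEmpty_nil, Bool.not_true,
      Bool.and_false, Bool.false_eq_true, if_false, List.nil_append]
    rw [pvA_fold xs [] [x] (by simp), pvGo_eq_bcore xs [x]]
    -- B side
    rw [PySem.List.enumerate_cons, List.filterMap_cons]
    simp only [show (if (((0 : Int), x).2.1 == "NOUN" && decide ((0:Int) < ((0 : Int), x).1)) = true
        then some ((0 : Int), x).1 else none) = none by simp]
    rw [show ((0 : Int) + 1) = 1 by norm_num]
    rw [pvCuts_shift xs 1 (by omega), pvB_fold]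
    simp only [List.nil_append]
    have h1 : ((pvNcuts xs).map (fun k : Nat => (1 : Int) + (k : Int)) ++ [((x :: xs).length : Int)])
        = (pvNcuts xs ++ [xs.length]).map (fun k : Nat => ((k : Int) + 1)) := by
      simp only [List.map_append, List.map_cons, List.map_nil, List.length_cons]
      congr 1
      apply List.map_congr_left; intro k _; ring
    rw [h1, pvSf_head x xs (pvNcuts xs), pvSf_eq_bcore]
    rfl
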